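-- pv_equiv track=rewrite | github.com/Dancesoul/leetcodebywhy | Solutions2.py | breakfastNumber
-- ===== SOURCE A (Python) =====
-- from typing import List
--
-- def breakfastNumber(staple: List[int], drinks: List[int], x: int) -> int:
--     # LCP 18. 早餐组合
--     staple.sort()
--     drinks.sort()
--     lens=len(staple)
--     lend=len(drinks)
--     i=0
--     j=lend-1
--     res=0
--     while(i<lens and j>=0):
--         if staple[i]+drinks[j]<=x:
--             res+=j+1
--             i+=1
--             continue
--         else:
--             j-=1
--     return res
-- ===== SOURCE B (Python) =====
-- from typing import List
-- import bisect
--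
-- def breakfastNumber(staple: List[int], drinks: List[int], x: int) -> int:
--     staple.sort()
--     drinks.sort()
--     total = 0
--     for s in staple:
--         total += bisect.bisect_right(drinks, x - s)
--     return total
-- ===== Notes on version B (the rewrite author's own statement) =====
-- stated objective: idiomatic
-- what changed: Replaces the coordinated two-pointer merge over both sorted lists with a per-staple binary search (bisect_right) over the sorted drinks list, summing the counts.
import Mathlib
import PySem

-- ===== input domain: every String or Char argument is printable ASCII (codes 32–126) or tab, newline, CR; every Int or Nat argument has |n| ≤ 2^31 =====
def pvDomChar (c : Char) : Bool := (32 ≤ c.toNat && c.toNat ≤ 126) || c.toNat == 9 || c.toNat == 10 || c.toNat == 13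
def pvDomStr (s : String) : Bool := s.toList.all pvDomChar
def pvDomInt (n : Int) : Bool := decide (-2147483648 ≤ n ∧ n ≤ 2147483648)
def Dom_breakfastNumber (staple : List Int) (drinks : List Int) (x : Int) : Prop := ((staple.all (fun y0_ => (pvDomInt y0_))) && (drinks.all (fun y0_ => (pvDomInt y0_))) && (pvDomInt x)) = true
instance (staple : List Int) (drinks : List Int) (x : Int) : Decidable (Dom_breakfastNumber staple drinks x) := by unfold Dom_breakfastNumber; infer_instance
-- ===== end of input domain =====

-- B replaces A's two-pointer merge over the sorted lists with a per-staple bisect_right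
-- over the sorted drinks list (idiomatic; same asymptotic cost).


-- ===== PORT A =====
-- staple[i] / drinks[j]: the loop keeps 0 ≤ i < len and 0 ≤ j < len, so pyGet? never
-- misses; .getD 0 only discharges the Option (exact on every reached input).
def aGet (l : List Int) (i : Int) : Int := (PySem.List.pyGet? l i).getD 0

def aloop (ss ds : List Int) (x : Int) (i j res : Int) : Int :=
  if h : i < (ss.length : Int) ∧ 0 ≤ j then
    if aGet ss i + aGet ds j ≤ x then
      aloop ss ds x (i + 1) j (res + j + 1)
    else
      aloop ss ds x i (j - 1) res
  else res
termination_by (((ss.length : Int) - i).toNat, (j + 1).toNat)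
decreasing_by
  · left; omega
  · right; omega

-- mutates its arguments (sorts both in place); the equivalence is about the return value,
-- and B performs the same in-place sorts.
def breakfastNumber (staple : List Int) (drinks : List Int) (x : Int) : Int :=
  let ss := PySem.List.sorted staple (fun s => s)
  let ds := PySem.List.sorted drinks (fun s => s)
  aloop ss ds x 0 ((ds.length : Int) - 1) 0

-- ===== PORT B =====
def breakfastNumber_alt (staple : List Int) (drinks : List Int) (x : Int) : Int :=
  let ss := PySem.List.sorted staple (fun s => s)
  let ds := PySem.List.sorted drinks (fun s => s)
  ss.foldl (fun total s => total + ((PySem.List.bisectRight ds (x - s) : Nat) : Int)) 0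

-- ===== PRECONDITION & SPEC =====
def Spec_breakfastNumber (staple : List Int) (drinks : List Int) (x : Int) (out : Int) : Prop := out = breakfastNumber_alt staple drinks x
instance (staple : List Int) (drinks : List Int) (x : Int) (out : Int) : Decidable (Spec_breakfastNumber staple drinks x out) := by unfold Spec_breakfastNumber; infer_instance

-- ===== CLAIM (what is proved, stated in full; the proofs are below) =====
def Claim_equal_breakfastNumber : Prop := ∀ (staple : List Int) (drinks : List Int) (x : Int), Dom_breakfastNumber staple drinks x → Spec_breakfastNumber staple drinks x (breakfastNumber staple drinks x)

-- ===== LEMMAS AND PROOFS =====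

-- sum of per-staple bisect counts over the tail of ss starting at index n
def tailSum (ss ds : List Int) (x : Int) (n : Nat) : Int :=
  ((ss.drop n).map (fun s => ((PySem.List.bisectRight ds (x - s) : Nat) : Int))).sum

lemma aGet_eq (l : List Int) (i : Int) (h0 : 0 ≤ i) (h1 : i.toNat < l.length) :
    aGet l i = l[i.toNat] := by
  unfold aGet PySem.List.pyGet? PySem.List.pyIdx?
  rw [if_pos h0, if_pos (by omega : i < (l.length : Int))]
  simp [List.getElem?_eq_getElem h1]

lemma pw_mono (l : List Int) (h : l.Pairwise (· ≤ ·)) (p q : Nat) (hpq : p ≤ q)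
    (hq : q < l.length) : l[p] ≤ l[q] := by
  rcases Nat.lt_or_ge p q with hlt | hge
  · exact (List.pairwise_iff_getElem.mp h) p q (by omega) hq hlt
  · have : p = q := by omega
    subst this; exact le_refl _

lemma bisect_eq_of_split (ds : List Int) (v : Int) (n : Nat)
    (hds : ds.Pairwise (· ≤ ·)) (hn : n ≤ ds.length)
    (hle : ∀ k (hk : k < ds.length), k < n → ds[k] ≤ v)
    (hgt : ∀ k (hk : k < ds.length), n ≤ k → v < ds[k]) :
    PySem.List.bisectRight ds v = n := by
  obtain ⟨hb, h1, h2⟩ := PySem.List.bisectRight_spec ds v hds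
  set b := PySem.List.bisectRight ds v with hbdef
  rcases Nat.lt_trichotomy b n with hlt | heq | hgtb
  · have hbl : b < ds.length := by omega
    have := h2 b hbl (le_refl _)
    have := hle b hbl hlt
    omega
  · exact heq
  · have hnl : n < ds.length := by omega
    have := h1 n hnl hgtb
    have := hgt n hnl (le_refl _)
    omega

lemma foldl_add_map (f : Int → Int) (l : List Int) (c : Int) :
    l.foldl (fun a s => a + f s) c = c + (l.map f).sum := by
  induction l generalizing c with
  | nil => simp
  | cons a t ih => simp [List.foldl_cons, ih (c + f a)]; ring

lemma tailSum_zero_of_big (ss ds : List Int) (x : Int) (n : Nat)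
    (hss : ss.Pairwise (· ≤ ·)) (hds : ds.Pairwise (· ≤ ·)) (hn : n < ss.length)
    (h : ∀ k (hk : k < ds.length), x < ss[n] + ds[k]) :
    tailSum ss ds x n = 0 := by
  unfold tailSum
  apply List.sum_eq_zero
  intro y hy
  rcases List.mem_map.mp hy with ⟨s, hs, rfl⟩
  have hsge : ss[n] ≤ s := by
    rcases List.mem_iff_getElem.mp hs with ⟨m, hm, hsm⟩
    have hm' : n + m < ss.length := by
      have := hm; simp [List.length_drop] at this; omega
    have : s = ss[n + m] := by rw [← hsm, List.getElem_drop]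
    rw [this]
    exact pw_mono ss hss n (n + m) (by omega) hm'
  have : PySem.List.bisectRight ds (x - s) = 0 := by
    apply bisect_eq_of_split ds (x - s) 0 hds (Nat.zero_le _)
    · intro k hk hk0; omega
    · intro k hk _
      have := h k hk
      omega
  simp [this]

lemma aloop_eq (ss ds : List Int) (x : Int)
    (hss : ss.Pairwise (· ≤ ·)) (hds : ds.Pairwise (· ≤ ·)) :
    ∀ (i j res : Int), 0 ≤ i → j < (ds.length : Int) →
      (∀ k (hk : k < ds.length), j < (k : Int) →
        ∀ (hi : i.toNat < ss.length), x < ss[i.toNat] + ds[k]) →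
      aloop ss ds x i j res = res + tailSum ss ds x i.toNat := by
  intro i j res
  induction i, j, res using aloop.induct ss ds x with
  | case1 i j res hcond hle ih =>
    intro h0 hj hinv
    have hiN : i.toNat < ss.length := by omega
    have hjN : j.toNat < ds.length := by omega
    rw [aloop, dif_pos hcond, if_pos hle]
    rw [ih (by omega) hj ?invNext]
    case invNext =>
      intro k hk hkj hi1
      have := hinv k hk hkj (by omega)
      have : ss[i.toNat] ≤ ss[(i + 1).toNat] :=
        pw_mono ss hss i.toNat (i + 1).toNat (by omega) hi1
      omega
    -- arithmetic: tailSum i = (j+1) + tailSum (i+1)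
    have hget : aGet ss i = ss[i.toNat] := aGet_eq ss i h0 hiN
    have hgetd : aGet ds j = ds[j.toNat] := aGet_eq ds j hcond.2 hjN
    have hbis : PySem.List.bisectRight ds (x - ss[i.toNat]) = (j + 1).toNat := by
      apply bisect_eq_of_split ds _ _ hds (by omega)
      · intro k hk hkn
        have h1 : ds[k] ≤ ds[j.toNat] := pw_mono ds hds k j.toNat (by omega) hjN
        rw [hget, hgetd] at hle
        omega
      · intro k hk hkn
        have := hinv k hk (by omega) hiN
        omega
    have hdrop : ss.drop i.toNat = ss[i.toNat] :: ss.drop (i.toNat + 1) :=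
      List.drop_eq_getElem_cons hiN
    have hnext : (i + 1).toNat = i.toNat + 1 := by omega
    unfold tailSum
    rw [hnext, hdrop]
    simp only [List.map_cons, List.sum_cons, hbis]
    omega
  | case2 i j res hcond hgt ih =>
    intro h0 hj hinv
    have hiN : i.toNat < ss.length := by omega
    have hjN : j.toNat < ds.length := by omega
    rw [aloop, dif_pos hcond, if_neg hgt]
    apply ih h0 (by omega)
    intro k hk hkj hi
    rcases Nat.lt_or_ge j.toNat k with hlt | hge
    · exact hinv k hk (by omega) hi
    · have hget : aGet ss i = ss[i.toNat] := aGet_eq ss i h0 hiN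
      have hgetd : aGet ds j = ds[j.toNat] := aGet_eq ds j hcond.2 hjN
      have hkeq : k = j.toNat := by omega
      subst hkeq
      rw [hget, hgetd] at hgt
      omega
  | case3 i j res hcond =>
    intro h0 hj hinv
    rw [aloop, dif_neg hcond]
    rcases Nat.lt_or_ge i.toNat ss.length with hi | hi
    · -- loop stopped because j < 0: every drink is too big for ss[i], hence for all later
      have hjneg : j < 0 := by omega
      have : tailSum ss ds x i.toNat = 0 := by
        apply tailSum_zero_of_big ss ds x i.toNat hss hds hi
        intro k hk
        exact hinv k hk (by omega) hi
      omega
    · have : ss.drop i.toNat = [] := List.drop_eq_nil_of_le hi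
      unfold tailSum
      rw [this]
      simp

-- ===== VERDICT (by name: the statement is the Claim_ definition above) =====
theorem breakfastNumber_spec : Claim_equal_breakfastNumber := by
  unfold Claim_equal_breakfastNumber
  intro staple drinks x _
  unfold Spec_breakfastNumber breakfastNumber breakfastNumber_alt
  set ss := PySem.List.sorted staple (fun s => s) with hssdef
  set ds := PySem.List.sorted drinks (fun s => s) with hdsdef
  have hss : ss.Pairwise (· ≤ ·) := PySem.List.sorted_pairwise staple (fun s => s)
  have hds : ds.Pairwise (· ≤ ·) := PySem.List.sorted_pairwise drinks (fun s => s)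
  rw [aloop_eq ss ds x hss hds 0 ((ds.length : Int) - 1) 0 (by omega) (by omega)
    (by intro k hk hkj _; omega)]
  rw [foldl_add_map]
  simp [tailSum]
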